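-- pv_equiv track=rewrite | github.com/Cyber-Neuron/Cursor-Chat-Transfer | import_cursor_chat.py | normalize_composer_ids
-- ===== SOURCE A (Python) =====
-- from typing import Any, Dict, List, Set, Tuple
--
-- def normalize_composer_ids(raw_ids: List[str] | None) -> List[str]:
--     if not raw_ids:
--         return []
--     result = []
--     for item in raw_ids:
--         for part in item.replace(",", " ").split():
--             if part:
--                 result.append(part.strip())
--     return result
-- ===== SOURCE B (Python) =====
-- from typing import List
--
-- def normalize_composer_ids(raw_ids: "List[str] | None") -> List[str]:
--     # Single-pass character scanner with an explicit token buffer: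
--     # no replace()/split() pipeline at all.
--     tokens = []
--     for item in (raw_ids or []):
--         cur = []
--         for ch in item:
--             if ch == "," or ch.isspace():
--                 if cur:
--                     tokens.append("".join(cur))
--                 cur = []
--             else:
--                 cur.append(ch)
--         if cur:
--             tokens.append("".join(cur))
--     return tokens
-- ===== Notes on version B (the rewrite author's own statement) =====
-- stated objective: alternative
-- what changed: B replaces A's replace-comma-then-str.split library pipeline (with its per-token emptiness guard and strip) by a hand-written single-pass character-level scanner that walks each string once, buffering the current token and emitting it at each comma/whitespace delimiter.
import Mathlib
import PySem

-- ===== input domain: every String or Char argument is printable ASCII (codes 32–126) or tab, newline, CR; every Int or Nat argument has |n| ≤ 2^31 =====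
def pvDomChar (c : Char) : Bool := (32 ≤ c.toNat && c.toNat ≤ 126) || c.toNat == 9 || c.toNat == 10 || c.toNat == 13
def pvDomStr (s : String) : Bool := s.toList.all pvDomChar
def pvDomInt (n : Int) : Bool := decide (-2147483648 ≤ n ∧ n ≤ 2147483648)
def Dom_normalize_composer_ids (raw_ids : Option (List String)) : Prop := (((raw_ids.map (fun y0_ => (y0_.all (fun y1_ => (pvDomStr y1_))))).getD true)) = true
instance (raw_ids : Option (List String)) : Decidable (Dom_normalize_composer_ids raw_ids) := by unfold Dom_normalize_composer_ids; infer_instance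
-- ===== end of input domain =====

-- B replaces A's replace+split library pipeline by a hand-written single-pass
-- character scanner with an explicit token buffer (objective: alternative).

-- ===== PORT A =====
def normalize_composer_ids (raw_ids : Option (List String)) : List String :=
  match raw_ids with
  | none => []
  | some l =>
    if l.isEmpty then []
    else
      l.foldl (fun result item =>
        (PySem.Str.split₀ (PySem.Str.replace item "," " ")).foldl
          (fun result part => if part ≠ "" then result ++ [PySem.Str.strip part] else result)
          result) []

-- ===== PORT B =====
-- inner character loop of Source B: cur is the pending token buffer (a char list), tokens the output so far
def scanItem (item : List Char) (tokens : List String) (cur : List Char) : List String :=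
  match item with
  | [] => if cur.isEmpty then tokens else tokens ++ [String.ofList cur]
  | ch :: rest =>
    if ch == ',' || PySem.Chars.isspace ch then
      scanItem rest (if cur.isEmpty then tokens else tokens ++ [String.ofList cur]) []
    else
      scanItem rest tokens (cur ++ [ch])

def normalize_composer_ids_alt (raw_ids : Option (List String)) : List String :=
  (raw_ids.getD []).foldl (fun tokens item => scanItem item.toList tokens []) []

-- ===== PRECONDITION & SPEC =====
def Spec_normalize_composer_ids (raw_ids : Option (List String)) (out : List String) : Prop := out = normalize_composer_ids_alt raw_ids
instance (raw_ids : Option (List String)) (out : List String) : Decidable (Spec_normalize_composer_ids raw_ids out) := by unfold Spec_normalize_composer_ids; infer_instance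

-- ===== CLAIM (what is proved, stated in full; the proofs are below) =====
def Claim_equal_normalize_composer_ids : Prop := ∀ (raw_ids : Option (List String)), Dom_normalize_composer_ids raw_ids → Spec_normalize_composer_ids raw_ids (normalize_composer_ids raw_ids)

-- ===== LEMMAS AND PROOFS =====

-- the char substitution performed by .replace(",", " ")
def pvSub (c : Char) : Char := if c = ',' then ' ' else c

theorem pv_replace_go_single (l : List Char) : ∀ (fuel : Nat) (acc : List Char),
    l.length ≤ fuel →
    PySem.Chars.replace.go [','] [' '] fuel l acc = acc.reverse ++ l.map pvSub := by
  induction l with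
  | nil =>
    intro fuel acc _
    cases fuel <;> simp [PySem.Chars.replace.go]
  | cons c t ih =>
    intro fuel acc h
    cases fuel with
    | zero => simp at h
    | succ n =>
      simp only [PySem.Chars.replace.go]
      by_cases hc : c = ','
      · subst hc
        rw [if_pos (by simp [List.isPrefixOf])]
        rw [show List.drop [','].length (',' :: t) = t from rfl]
        rw [show ([' '].reverse ++ acc : List Char) = ' ' :: acc from by simp]
        rw [ih n (' ' :: acc) (by simpa using Nat.lt_succ_iff.mp (by simpa using h))]
        simp [pvSub]
      · rw [if_neg (by simp [List.isPrefixOf]; exact fun hcon => hc hcon.symm)]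
        rw [ih n (c :: acc) (by simpa using Nat.lt_succ_iff.mp (by simpa using h))]
        simp [pvSub, hc]

theorem pv_replace_single (s : List Char) :
    PySem.Chars.replace s [','] [' '] = s.map pvSub := by
  simp only [PySem.Chars.replace]
  rw [if_neg (by simp)]
  simpa using pv_replace_go_single s s.length [] le_rfl

theorem pv_replace_toList (s : String) :
    (PySem.Str.replace s "," " ").toList = s.toList.map pvSub := by
  simp [PySem.Str.replace, pv_replace_single]

-- the accumulator of split₀.go is a prefix of the result
theorem pv_go_acc (s : List Char) : ∀ (cur : List Char) (acc : List (List Char)),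
    PySem.Chars.split₀.go s cur acc = acc.reverse ++ PySem.Chars.split₀.go s cur [] := by
  induction s with
  | nil =>
    intro cur acc
    by_cases hc : cur.isEmpty <;> simp [PySem.Chars.split₀.go, hc]
  | cons c rest ih =>
    intro cur acc
    by_cases hs : PySem.Chars.isspace c
    · by_cases hc : cur.isEmpty
      · simp only [PySem.Chars.split₀.go, hs, hc, if_pos]
        exact ih [] acc
      · simp only [PySem.Chars.split₀.go, hs, if_true, hc, if_false, Bool.false_eq_true]
        rw [ih [] (cur.reverse :: acc), ih [] [cur.reverse]]
        simp
    · simp only [PySem.Chars.split₀.go, hs, Bool.false_eq_true, if_false]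
      exact ih (c :: cur) acc

-- Source B's delimiter test agrees with 'is a space after the comma substitution'
theorem pv_delim (c : Char) :
    (c == ',' || PySem.Chars.isspace c) = PySem.Chars.isspace (pvSub c) := by
  by_cases hc : c = ','
  · subst hc; decide
  · simp [pvSub, hc]

-- the scanner over an item equals split₀ of the comma-substituted item
theorem pv_scan_eq (s : List Char) : ∀ (cur : List Char) (tokens : List String),
    scanItem s tokens cur =
      tokens ++ (PySem.Chars.split₀.go (s.map pvSub) cur.reverse []).map String.ofList := by
  induction s with
  | nil =>
    intro cur tokens
    by_cases hc : cur.isEmpty <;>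
      simp [scanItem, PySem.Chars.split₀.go, hc]
  | cons c rest ih =>
    intro cur tokens
    by_cases hd : (c == ',' || PySem.Chars.isspace c) = true
    · have hsp : PySem.Chars.isspace (pvSub c) = true := by rw [← pv_delim]; exact hd
      simp only [scanItem, hd, if_true, List.map_cons, PySem.Chars.split₀.go, hsp,
        List.reverse_reverse]
      by_cases hc : cur.isEmpty
      · rw [if_pos hc, if_pos (by simpa using hc)]
        exact ih [] tokens
      · rw [if_neg hc, if_neg (by simpa using hc)]
        rw [pv_go_acc (rest.map pvSub) [] [cur]]
        rw [ih [] (tokens ++ [String.ofList cur])]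
        simp
    · have hne : c ≠ ',' := by
        intro h; subst h; simp at hd
      have hsub : pvSub c = c := by simp [pvSub, hne]
      have hsp : PySem.Chars.isspace c = false := by
        cases h : PySem.Chars.isspace c
        · rfl
        · exact absurd (by simp [h]) hd
      have h1 : scanItem (c :: rest) tokens cur = scanItem rest tokens (cur ++ [c]) := by
        simp only [scanItem]
        rw [if_neg (by simp [hne, hsp])]
      have h2 : PySem.Chars.split₀.go ((c :: rest).map pvSub) cur.reverse [] =
          PySem.Chars.split₀.go (rest.map pvSub) (c :: cur.reverse) [] := by
        simp only [List.map_cons, hsub, PySem.Chars.split₀.go, hsp, Bool.false_eq_true, if_false]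
      rw [h1, h2, ih (cur ++ [c]) tokens]
      simp

-- B's outer loop as a flatMap
theorem pv_B_flatMap (l : List String) :
    l.foldl (fun tokens item => scanItem item.toList tokens []) [] =
      l.flatMap (fun item => PySem.Str.split₀ (PySem.Str.replace item "," " ")) := by
  have key : ∀ (acc : List String),
      l.foldl (fun tokens item => scanItem item.toList tokens []) acc =
        acc ++ l.flatMap (fun item => PySem.Str.split₀ (PySem.Str.replace item "," " ")) := by
    induction l with
    | nil => simp
    | cons x t ih =>
      intro acc
      simp only [List.foldl_cons]
      rw [pv_scan_eq x.toList [] acc, ih]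
      simp only [PySem.Str.split₀, pv_replace_toList, PySem.Chars.split₀]
      simp
  simpa using key []

-- every word produced by split₀ is nonempty and whitespace-free
theorem pv_go_words (s : List Char) : ∀ (cur : List Char) (acc : List (List Char)),
    (∀ c ∈ cur, PySem.Chars.isspace c = false) →
    (∀ w ∈ acc, w ≠ [] ∧ ∀ c ∈ w, PySem.Chars.isspace c = false) →
    ∀ w ∈ PySem.Chars.split₀.go s cur acc, w ≠ [] ∧ ∀ c ∈ w, PySem.Chars.isspace c = false := by
  induction s with
  | nil =>
    intro cur acc hcur hacc w hw
    by_cases hc : cur.isEmpty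
    · simp only [PySem.Chars.split₀.go, hc, if_true, List.mem_reverse] at hw
      exact hacc w hw
    · simp only [PySem.Chars.split₀.go, hc, Bool.false_eq_true, if_false, List.mem_reverse,
        List.mem_cons] at hw
      rcases hw with hw | hw
      · subst hw
        refine ⟨by simpa [List.isEmpty_iff] using hc, ?_⟩
        intro c hcmem
        exact hcur c (List.mem_reverse.mp hcmem)
      · exact hacc w hw
  | cons c rest ih =>
    intro cur acc hcur hacc w hw
    by_cases hs : PySem.Chars.isspace c
    · by_cases hc : cur.isEmpty
      · simp only [PySem.Chars.split₀.go, hs, hc, if_true] at hw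
        exact ih [] acc (by simp) hacc w hw
      · simp only [PySem.Chars.split₀.go, hs, hc, if_true, Bool.false_eq_true, if_false] at hw
        refine ih [] (cur.reverse :: acc) (by simp) ?_ w hw
        intro v hv
        rcases List.mem_cons.mp hv with hv | hv
        · subst hv
          exact ⟨by simpa [List.isEmpty_iff] using hc,
            fun d hd => hcur d (List.mem_reverse.mp hd)⟩
        · exact hacc v hv
    · simp only [PySem.Chars.split₀.go, hs, Bool.false_eq_true, if_false] at hw
      refine ih (c :: cur) acc ?_ hacc w hw
      intro d hd
      rcases List.mem_cons.mp hd with hd | hd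
      · subst hd; simpa using hs
      · exact hcur d hd

theorem pv_split_words (s : List Char) :
    ∀ w ∈ PySem.Chars.split₀ s, w ≠ [] ∧ ∀ c ∈ w, PySem.Chars.isspace c = false := by
  simpa [PySem.Chars.split₀] using pv_go_words s [] [] (by simp) (by simp)

theorem pv_strip_id (w : List Char) (_hne : w ≠ [])
    (h : ∀ c ∈ w, PySem.Chars.isspace c = false) : PySem.Chars.strip w = w := by
  have hl : PySem.Chars.lstrip w = w := by
    simp only [PySem.Chars.lstrip]
    exact List.dropWhile_eq_self_iff.mpr (by
      intro hlen
      have := h _ (List.getElem_mem hlen)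
      simp only [this]
      exact Bool.false_ne_true)
  have hr : PySem.Chars.rstrip w = w := by
    simp only [PySem.Chars.rstrip]
    rw [List.dropWhile_eq_self_iff.mpr (by
      intro hlen
      have hm : w.reverse[0] ∈ w := List.mem_reverse.mp (List.getElem_mem hlen)
      have := h _ hm
      simp only [this]
      exact Bool.false_ne_true)]
    simp
  simp [PySem.Chars.strip, hl, hr]

-- A's inner loop over the words of one item just appends them
theorem pv_inner (parts : List String)
    (h : ∀ p ∈ parts, p ≠ "" ∧ PySem.Str.strip p = p) :
    ∀ res : List String,
      parts.foldl (fun r part => if part ≠ "" then r ++ [PySem.Str.strip part] else r) res =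
        res ++ parts := by
  induction parts with
  | nil => simp
  | cons p t ih =>
    intro res
    obtain ⟨hne, hst⟩ := h p (by simp)
    simp only [List.foldl_cons, if_pos hne, hst]
    rw [ih (fun q hq => h q (by simp [hq]))]
    simp

theorem pv_split_replace_words (s : String) :
    ∀ p ∈ PySem.Str.split₀ (PySem.Str.replace s "," " "),
      p ≠ "" ∧ PySem.Str.strip p = p := by
  intro p hp
  simp only [PySem.Str.split₀, List.mem_map] at hp
  obtain ⟨w, hw, rfl⟩ := hp
  obtain ⟨hne, hns⟩ := pv_split_words _ w hw
  constructor
  · intro hcon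
    apply hne
    simpa using congrArg String.toList hcon
  · simp only [PySem.Str.strip]
    rw [show (String.ofList w).toList = w from by simp]
    rw [pv_strip_id w hne hns]

-- A as a flatMap
theorem pv_A_flatMap (l : List String) :
    l.foldl (fun result item =>
        (PySem.Str.split₀ (PySem.Str.replace item "," " ")).foldl
          (fun result part => if part ≠ "" then result ++ [PySem.Str.strip part] else result)
          result) [] =
      l.flatMap (fun item => PySem.Str.split₀ (PySem.Str.replace item "," " ")) := by
  have key : ∀ (acc : List String),
      l.foldl (fun result item =>
          (PySem.Str.split₀ (PySem.Str.replace item "," " ")).foldl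
            (fun result part => if part ≠ "" then result ++ [PySem.Str.strip part] else result)
            result) acc =
        acc ++ l.flatMap (fun item => PySem.Str.split₀ (PySem.Str.replace item "," " ")) := by
    induction l with
    | nil => simp
    | cons x t ih =>
      intro acc
      simp only [List.foldl_cons]
      rw [pv_inner _ (pv_split_replace_words x) acc, ih]
      simp
  simpa using key []

-- ===== VERDICT (by name: the statement is the Claim_ definition above) =====
theorem normalize_composer_ids_spec : Claim_equal_normalize_composer_ids := by
  intro raw_ids _
  unfold Spec_normalize_composer_ids
  cases raw_ids with
  | none => rfl
  | some l =>
    by_cases hl : l.isEmpty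
    · rw [List.isEmpty_iff.mp hl]
      rfl
    · simp only [normalize_composer_ids, normalize_composer_ids_alt, Option.getD_some,
        hl, Bool.false_eq_true, if_false]
      rw [pv_A_flatMap, pv_B_flatMap]
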